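-- pv_equiv track=rewrite | github.com/clairexuu/PSWC-Capacity-Dashboard | wrmd-scraper/firebase_setup.py | match_species_name
-- ===== SOURCE A (Python) =====
-- def match_species_name(patient_species):
--     """
--     Match the patient species string with one of the known species in the database.
--     A match is determined by scanning words in patient species from right to left and
--     checking if any of those words appear in the known species.
--     Returns the matched species name or None if no match is found.
--     """
--     known_species = [
--         "Amphibian",
--         "Coyote",
--         "Deer",
--         "Beaver",
--         "Bat",
--         "Rat Mouse",
--         "Squirrel",
--         "Chipmunk",
--         "Eastern Cottontail",
--         "Weasel",
--         "Marten",
--         "Reptile",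
--         "Fox",
--         "Badger",
--         "Fisher",
--         "Skunk",
--         "Raccoon",
--         "Porcupine",
--         "Muskrat MtBeavor Marmot",
--         "River Otter",
--         "Opossum",
--         "Pigeon"
--     ]
--
--     patient_words = patient_species.lower().split()[::-1]  # reverse the order
--     for word in patient_words:
--         for known in known_species:
--             known_words = set(known.lower().split())
--             if word in known_words:
--                 return known
--     return None
-- ===== SOURCE B (Python) =====
-- KNOWN_SPECIES = [
--     "Amphibian",
--     "Coyote",
--     "Deer",
--     "Beaver",
--     "Bat",
--     "Rat Mouse",
--     "Squirrel",
--     "Chipmunk",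
--     "Eastern Cottontail",
--     "Weasel",
--     "Marten",
--     "Reptile",
--     "Fox",
--     "Badger",
--     "Fisher",
--     "Skunk",
--     "Raccoon",
--     "Porcupine",
--     "Muskrat MtBeavor Marmot",
--     "River Otter",
--     "Opossum",
--     "Pigeon",
-- ]
--
--
-- def _build_index():
--     # inverted index: lowercase word -> species, first occurrence wins
--     index = {}
--     for known in KNOWN_SPECIES:
--         for w in known.lower().split():
--             if w not in index:
--                 index[w] = known
--     return index
--
--
-- _INDEX = _build_index()
--
--
-- def match_species_name(patient_species):
--     """Scan words right-to-left; return the species whose word set first matches."""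
--     for word in reversed(patient_species.lower().split()):
--         if word in _INDEX:
--             return _INDEX[word]
--     return None
-- ===== Notes on version B (the rewrite author's own statement) =====
-- stated objective: idiomatic
-- what changed: Replaces the nested patient-word x known-species scan (rebuilding each species' word set per patient word) with a precomputed inverted-index dict from lowercase word to species (first occurrence wins), then a single pass over the reversed patient words.
import Mathlib
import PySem

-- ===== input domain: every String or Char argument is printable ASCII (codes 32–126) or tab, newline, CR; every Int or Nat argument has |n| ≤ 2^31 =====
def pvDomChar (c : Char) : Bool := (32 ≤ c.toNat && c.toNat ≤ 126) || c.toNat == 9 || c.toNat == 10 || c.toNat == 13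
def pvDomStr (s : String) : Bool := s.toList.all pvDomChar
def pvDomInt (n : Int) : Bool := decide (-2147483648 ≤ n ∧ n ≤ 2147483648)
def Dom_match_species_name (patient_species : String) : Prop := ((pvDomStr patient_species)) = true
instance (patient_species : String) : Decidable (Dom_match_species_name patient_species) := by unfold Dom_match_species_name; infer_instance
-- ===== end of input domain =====

-- B replaces A's nested patient-word × known-species scan with a precomputed
-- inverted-index dict (word → species, first occurrence wins) and a single pass
-- over the reversed patient words (objective: idiomatic).


-- ===== PORT A =====
def pvKnownSpecies : List String :=
  ["Amphibian", "Coyote", "Deer", "Beaver", "Bat", "Rat Mouse", "Squirrel",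
   "Chipmunk", "Eastern Cottontail", "Weasel", "Marten", "Reptile", "Fox",
   "Badger", "Fisher", "Skunk", "Raccoon", "Porcupine",
   "Muskrat MtBeavor Marmot", "River Otter", "Opossum", "Pigeon"]

-- inner loop: 'for known in known_species: if word in set(known.lower().split()): return known'
def pvAInner (word : String) : List String → Option String
  | [] => none
  | known :: rest =>
      if (PySem.Set.contains (PySem.Set.ofList (PySem.Str.split₀ (PySem.Str.lower known))) word) = true
      then some known
      else pvAInner word rest

-- outer loop: 'for word in patient_words: …'
def pvAOuter : List String → Option String
  | [] => none
  | w :: ws =>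
      match pvAInner w pvKnownSpecies with
      | some k => some k
      | none => pvAOuter ws

def match_species_name (patient_species : String) : Option String :=
  -- patient_words = patient_species.lower().split()[::-1]
  pvAOuter ((PySem.List.slice? (PySem.Str.split₀ (PySem.Str.lower patient_species)) none none (-1)).getD [])

-- ===== PORT B =====
-- _build_index(): word → species, inserted only when the word is not yet a key
def pvIndex : PySem.Dict String String :=
  pvKnownSpecies.foldl
    (fun d known =>
      (PySem.Str.split₀ (PySem.Str.lower known)).foldl
        (fun d w => if d.contains w then d else d.insert w known) d)
    PySem.Dict.empty

-- 'for word in reversed(...): if word in _INDEX: return _INDEX[word]'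
def pvBScan : List String → Option String
  | [] => none
  | w :: ws =>
      if pvIndex.contains w then pvIndex.get? w else pvBScan ws

def match_species_name_alt (patient_species : String) : Option String :=
  pvBScan (PySem.Str.split₀ (PySem.Str.lower patient_species)).reverse

-- ===== PRECONDITION & SPEC =====
def Spec_match_species_name (patient_species : String) (out : Option String) : Prop := out = match_species_name_alt patient_species
instance (patient_species : String) (out : Option String) : Decidable (Spec_match_species_name patient_species out) := by unfold Spec_match_species_name; infer_instance

-- ===== CLAIM (what is proved, stated in full; the proofs are below) =====
def Claim_equal_match_species_name : Prop := ∀ (patient_species : String), Dom_match_species_name patient_species → Spec_match_species_name patient_species (match_species_name patient_species)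

-- ===== LEMMAS AND PROOFS =====

-- one known's word loop of the index build: lookup afterwards is the old lookup,
-- or (if absent) 'known' when w is among this known's words
theorem pv_get_insertWords (ws : List String) (d : PySem.Dict String String)
    (known w : String) :
    (ws.foldl (fun d x => if d.contains x then d else d.insert x known) d).get? w
      = ((d.get? w).or (if ws.contains w then some known else none)) := by
  induction ws generalizing d with
  | nil => simp
  | cons x xs ih =>
    simp only [List.foldl_cons, ih]
    by_cases hxw : w = x
    · subst hxw
      by_cases hc : d.contains w = true
      · have hg : ∃ v, d.get? w = some v := by
          rw [PySem.Dict.contains_eq_isSome_get?] at hc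
          cases hg : d.get? w with
          | none => simp [hg] at hc
          | some v => exact ⟨v, rfl⟩
        obtain ⟨v, hg⟩ := hg
        simp [hc, hg, Option.or]
      · simp only [Bool.not_eq_true] at hc
        simp only [hc, Bool.false_eq_true, if_false, PySem.Dict.get?_insert_self]
        have hg : d.get? w = none := by
          rw [PySem.Dict.contains_eq_isSome_get?] at hc
          cases hg : d.get? w with
          | none => rfl
          | some v => simp [hg] at hc
        simp [hg, Option.or]
    · have h1 : ∀ d' : PySem.Dict String String,
          (if d'.contains x then d' else d'.insert x known).get? w = d'.get? w := by
        intro d'; split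
        · rfl
        · exact PySem.Dict.get?_insert_of_ne d' known hxw
      rw [h1]
      have : (x :: xs).contains w = xs.contains w := by
        simp [hxw]
      rw [this]

-- lookup in the full index built over ks starting from d = old lookup, else A's inner scan
theorem pv_get_build (ks : List String) (d : PySem.Dict String String) (w : String) :
    (ks.foldl
      (fun d known =>
        (PySem.Str.split₀ (PySem.Str.lower known)).foldl
          (fun d x => if d.contains x then d else d.insert x known) d) d).get? w
      = (d.get? w).or (pvAInner w ks) := by
  induction ks generalizing d with
  | nil => simp [pvAInner]
  | cons k rest ih =>
    simp only [List.foldl_cons, ih, pv_get_insertWords]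
    rw [pvAInner]
    have hmem : (PySem.Set.contains (PySem.Set.ofList (PySem.Str.split₀ (PySem.Str.lower k))) w)
        = (PySem.Str.split₀ (PySem.Str.lower k)).contains w := by
      simp [PySem.Set.contains]
    rw [hmem]
    cases hws : (PySem.Str.split₀ (PySem.Str.lower k)).contains w <;> simp

-- per-word agreement: the dict lookup equals A's inner scan over the known list
theorem pv_index_eq_inner (w : String) : pvIndex.get? w = pvAInner w pvKnownSpecies := by
  rw [pvIndex, pv_get_build]
  simp [PySem.Dict.get?_empty, Option.or]

-- the two word loops agree on every word list
theorem pv_scan_eq_outer (ws : List String) : pvAOuter ws = pvBScan ws := by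
  induction ws with
  | nil => rfl
  | cons w rest ih =>
    rw [pvAOuter, pvBScan, ← pv_index_eq_inner, PySem.Dict.contains_eq_isSome_get?]
    cases hg : pvIndex.get? w <;> simp [ih]

-- ===== VERDICT (by name: the statement is the Claim_ definition above) =====
theorem match_species_name_spec : Claim_equal_match_species_name := by
  intro s _
  show match_species_name s = match_species_name_alt s
  rw [match_species_name, match_species_name_alt,
      PySem.List.slice?_none_none_neg_one, Option.getD_some, pv_scan_eq_outer]
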